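-- pv_equiv track=rewrite | github.com/NejcOP/Sniped | backend/scraper/google_maps.py | _normalize_proxy_url
-- ===== SOURCE A (Python) =====
-- from typing import Callable, List, Optional
--
-- def _normalize_proxy_url(raw_proxy: Optional[str]) -> str:
--     value = str(raw_proxy or "").strip()
--     if not value:
--         return ""
--     if "://" in value:
--         return value
--
--     parts = value.split(":")
--     if len(parts) == 4:
--         host, port, username, password = [part.strip() for part in parts]
--         if host and port and username and password:
--             return f"http://{username}:{password}@{host}:{port}"
--     return value
-- ===== SOURCE B (Python) =====
-- def _normalize_proxy_url(raw_proxy):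
--     value = str(raw_proxy or "").strip()
--     if not value:
--         return ""
--     if "://" in value:
--         return value
--
--     # single pass: record the index of every colon, rejecting at the fourth
--     cuts = []
--     for i, ch in enumerate(value):
--         if ch == ":":
--             if len(cuts) == 3:
--                 return value  # a fourth colon: not host:port:user:pass
--             cuts.append(i)
--     if len(cuts) == 3:
--         i, j, k = cuts
--         host = value[:i].strip()
--         port = value[i + 1:j].strip()
--         username = value[j + 1:k].strip()
--         password = value[k + 1:].strip()
--         if host and port and username and password:
--             return f"http://{username}:{password}@{host}:{port}"
--     return value
-- ===== Notes on version B (the rewrite author's own statement) =====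
-- stated objective: alternative
-- what changed: Replaces the colon split with a len==4 check and list unpacking by a single indexed scan that records colon positions (bailing out early at a fourth colon) and then slices the original string at those three indices.
import Mathlib
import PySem

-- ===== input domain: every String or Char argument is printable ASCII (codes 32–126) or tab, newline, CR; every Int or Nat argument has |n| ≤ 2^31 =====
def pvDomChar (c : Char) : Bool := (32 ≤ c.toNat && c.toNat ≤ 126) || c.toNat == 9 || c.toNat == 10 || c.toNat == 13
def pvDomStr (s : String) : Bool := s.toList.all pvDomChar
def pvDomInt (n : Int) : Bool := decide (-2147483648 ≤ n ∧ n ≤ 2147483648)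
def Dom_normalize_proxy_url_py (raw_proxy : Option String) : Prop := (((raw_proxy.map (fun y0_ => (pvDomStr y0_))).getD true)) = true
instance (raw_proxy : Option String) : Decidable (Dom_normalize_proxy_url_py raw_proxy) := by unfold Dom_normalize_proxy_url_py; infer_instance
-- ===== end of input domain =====

-- B replaces the colon-split-plus-length-4 check by a single indexed scan that records the
-- colon positions (bailing out at a fourth colon) and then slices the original string
-- at those three indices (alternative decomposition; same behaviour, return value only).

-- ===== PORT A =====
-- literal port of A: strip, empty/'://' guards, split(":") with a len == 4 check,
-- per-part strip and truthiness, f-string rebuild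
def normalize_proxy_url_py (raw_proxy : Option String) : String :=
  let value := PySem.Chars.strip (raw_proxy.getD "").toList
  if value = [] then ""
  else if PySem.Chars.isIn "://".toList value then String.ofList value
  else
    let parts := PySem.Chars.splitOn value [':']
    if parts.length = 4 then
      match parts.map PySem.Chars.strip with
      | [host, port, username, password] =>
        if host ≠ [] ∧ port ≠ [] ∧ username ≠ [] ∧ password ≠ [] then
          String.ofList ("http://".toList ++ username ++ [':'] ++ password ++ ['@'] ++ host ++ [':'] ++ port)
        else String.ofList value
      | _ => String.ofList value
    else String.ofList value

-- ===== PORT B =====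
-- Source B's for-loop over enumerate(value): collect colon indices, none = the early
-- 'return value' taken at a fourth colon
def findCuts : List Char → Nat → List Nat → Option (List Nat)
  | [], _, cuts => some cuts
  | c :: t, i, cuts =>
    if c = ':' then
      if cuts.length = 3 then none
      else findCuts t (i + 1) (cuts ++ [i])
    else findCuts t (i + 1) cuts

-- literal port of B: same strip and guards, then the indexed colon scan and slicing.
-- Python slices value[a:b] with 0 ≤ a ≤ b ≤ len are ported as (drop a).take (b - a),
-- exact on that in-range nonnegative domain (the recorded indices are such).
def normalize_proxy_url_py_alt (raw_proxy : Option String) : String :=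
  let value := PySem.Chars.strip (raw_proxy.getD "").toList
  if value = [] then ""
  else if PySem.Chars.isIn "://".toList value then String.ofList value
  else
    match findCuts value 0 [] with
    | none => String.ofList value            -- early return inside the loop
    | some cuts =>
      if h3 : cuts.length = 3 then           -- if len(cuts) == 3: i, j, k = cuts
        let i := cuts[0]'(by omega)
        let j := cuts[1]'(by omega)
        let k := cuts[2]'(by omega)
        let host := PySem.Chars.strip (value.take i)
        let port := PySem.Chars.strip ((value.drop (i + 1)).take (j - (i + 1)))
        let username := PySem.Chars.strip ((value.drop (j + 1)).take (k - (j + 1)))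
        let password := PySem.Chars.strip (value.drop (k + 1))
        if host ≠ [] ∧ port ≠ [] ∧ username ≠ [] ∧ password ≠ [] then
          String.ofList ("http://".toList ++ username ++ [':'] ++ password ++ ['@'] ++ host ++ [':'] ++ port)
        else String.ofList value
      else String.ofList value

-- ===== PRECONDITION & SPEC =====
def Spec_normalize_proxy_url_py (raw_proxy : Option String) (out : String) : Prop := out = normalize_proxy_url_py_alt raw_proxy
instance (raw_proxy : Option String) (out : String) : Decidable (Spec_normalize_proxy_url_py raw_proxy out) := by unfold Spec_normalize_proxy_url_py; infer_instance

-- ===== CLAIM (what is proved, stated in full; the proofs are below) =====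
def Claim_equal_normalize_proxy_url_py : Prop := ∀ (raw_proxy : Option String), Dom_normalize_proxy_url_py raw_proxy → Spec_normalize_proxy_url_py raw_proxy (normalize_proxy_url_py raw_proxy)

-- ===== LEMMAS AND PROOFS =====

-- proof device: Python's partition(":") on a char list, used only to decompose the input
def partColon : List Char → List Char × List Char × List Char
  | [] => ([], [], [])
  | c :: t =>
    if c = ':' then ([], [':'], t)
    else
      let r := partColon t
      (c :: r.1, r.2.1, r.2.2)

-- structural form of split-on-':' (proof device linking the two ports)
def splitC : List Char → List (List Char)
  | [] => [[]]
  | c :: t => if c = ':' then [] :: splitC t else (splitC t).modifyHead (c :: ·)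

theorem go_char (l : List Char) : ∀ (fuel : Nat) (cur : List Char) (acc : List (List Char)),
    l.length < fuel →
    PySem.Chars.splitOn.go [':'] fuel l cur acc
      = acc.reverse ++ (splitC l).modifyHead (cur.reverse ++ ·) := by
  induction l with
  | nil =>
    intro fuel cur acc h
    match fuel with
    | fuel+1 => simp [PySem.Chars.splitOn.go, splitC]
  | cons c t ih =>
    intro fuel cur acc h
    match fuel with
    | fuel+1 =>
      by_cases hc : c = ':'
      · subst hc
        simp only [PySem.Chars.splitOn.go, List.isPrefixOf, beq_self_eq_true,
          Bool.and_true, if_true, splitC, List.drop, List.length]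
        rw [ih fuel [] (cur.reverse :: acc) (by simpa using h)]
        cases splitC t <;> simp
      · have hb : (':' == c) = false := by simp [Ne.symm hc]
        simp only [PySem.Chars.splitOn.go, List.isPrefixOf, hb, Bool.false_and,
          Bool.false_eq_true, if_false]
        rw [ih fuel (c :: cur) acc (by simpa using h)]
        cases ht : splitC t with
        | nil => simp [splitC, hc, ht]
        | cons a b => simp [splitC, hc, ht]

theorem splitOn_colon (l : List Char) : PySem.Chars.splitOn l [':'] = splitC l := by
  rw [PySem.Chars.splitOn, go_char l (l.length+1) [] [] (by omega)]
  cases h : splitC l <;> simp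

theorem partColon_sep_nil_iff (l : List Char) : (partColon l).2.1 = [] ↔ ':' ∉ l := by
  induction l with
  | nil => simp [partColon]
  | cons c t ih =>
    by_cases hc : c = ':'
    · subst hc; simp [partColon]
    · simp [partColon, hc, ih, Ne.symm hc]

theorem partColon_decomp {l : List Char} (h : (partColon l).2.1 ≠ []) :
    l = (partColon l).1 ++ ':' :: (partColon l).2.2 ∧ ':' ∉ (partColon l).1 := by
  induction l with
  | nil => simp [partColon] at h
  | cons c t ih =>
    by_cases hc : c = ':'
    · subst hc; simp [partColon]
    · simp only [partColon, hc, if_false] at h ⊢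
      obtain ⟨h1, h2⟩ := ih h
      exact ⟨by simpa using congrArg (c :: ·) h1, by simp [Ne.symm hc, h2]⟩

theorem splitC_no_colon {l : List Char} (h : ':' ∉ l) : splitC l = [l] := by
  induction l with
  | nil => rfl
  | cons c t ih =>
    simp only [List.mem_cons, not_or] at h
    simp [splitC, Ne.symm h.1, ih h.2]

theorem splitC_ne_nil (l : List Char) : splitC l ≠ [] := by
  induction l with
  | nil => simp [splitC]
  | cons c t ih =>
    by_cases hc : c = ':'
    · simp [splitC, hc]
    · simp only [splitC, hc, if_false]
      cases h : splitC t with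
      | nil => exact absurd h ih
      | cons a b => simp

theorem splitC_cons {l : List Char} (h : (partColon l).2.1 ≠ []) :
    splitC l = (partColon l).1 :: splitC (partColon l).2.2 := by
  induction l with
  | nil => simp [partColon] at h
  | cons c t ih =>
    by_cases hc : c = ':'
    · subst hc; simp [splitC, partColon]
    · simp only [partColon, hc, if_false] at h ⊢
      simp only [splitC, hc, if_false]
      rw [ih h]
      simp

theorem splitC_app {a : List Char} (h : ':' ∉ a) (b : List Char) :
    splitC (a ++ ':' :: b) = a :: splitC b := by
  induction a with
  | nil => simp [splitC]
  | cons c t ih =>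
    simp only [List.mem_cons, not_or] at h
    simp [splitC, Ne.symm h.1, ih h.2]

-- findCuts over a colon-free list leaves the accumulator unchanged
theorem findCuts_no_colon {l : List Char} (h : ':' ∉ l) (i : Nat) (cuts : List Nat) :
    findCuts l i cuts = some cuts := by
  induction l generalizing i with
  | nil => rfl
  | cons c t ih =>
    simp only [List.mem_cons, not_or] at h
    simp [findCuts, Ne.symm h.1, ih h.2]

-- findCuts steps over a colon-free prefix and consumes the next colon
theorem findCuts_step {a : List Char} (h : ':' ∉ a) (b : List Char) (i : Nat) (cuts : List Nat) :
    findCuts (a ++ ':' :: b) i cuts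
      = if cuts.length = 3 then none
        else findCuts b (i + a.length + 1) (cuts ++ [i + a.length]) := by
  induction a generalizing i with
  | nil => simp [findCuts]
  | cons c t ih =>
    simp only [List.mem_cons, not_or] at h
    simp only [List.cons_append, findCuts, Ne.symm h.1, if_false]
    rw [ih h.2]
    rw [show i + 1 + t.length = i + (c :: t).length from by
      simp only [List.length_cons]; omega]

-- a colon after three recorded cuts aborts the scan
theorem findCuts_overflow {l : List Char} (h : ':' ∈ l) (i : Nat) {cuts : List Nat}
    (hc : cuts.length = 3) : findCuts l i cuts = none := by
  induction l generalizing i with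
  | nil => simp at h
  | cons c t ih =>
    by_cases hcc : c = ':'
    · simp [findCuts, hcc, hc]
    · simp only [List.mem_cons] at h
      have h' : ':' ∈ t := by tauto
      simp [findCuts, hcc, ih h']

theorem drop_cut (a b : List Char) (n : Nat) :
    (a ++ ':' :: b).drop (a.length + (n + 1)) = b.drop n := by
  rw [List.drop_length_add_append, List.drop_succ_cons]

theorem ports_eq (raw_proxy : Option String) :
    normalize_proxy_url_py raw_proxy = normalize_proxy_url_py_alt raw_proxy := by
  unfold normalize_proxy_url_py normalize_proxy_url_py_alt
  set vl := PySem.Chars.strip (raw_proxy.getD "").toList with hvl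
  by_cases h0 : vl = []
  · simp [h0]
  · simp only [h0, if_false]
    have htl : "://".toList = [':', '/', '/'] := rfl
    rw [htl]
    by_cases h1 : PySem.Chars.isIn [':', '/', '/'] vl = true
    · simp [h1]
    · simp only [h1, Bool.false_eq_true, if_false]
      rw [splitOn_colon]
      by_cases s1 : (partColon vl).2.1 = []
      · -- no colon at all
        have hnc : ':' ∉ vl := (partColon_sep_nil_iff vl).mp s1
        rw [splitC_no_colon hnc, findCuts_no_colon hnc]
        simp
      · obtain ⟨d1, n1⟩ := partColon_decomp s1
        set a1 := (partColon vl).1 with ha1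
        set r1 := (partColon vl).2.2 with hr1
        by_cases s2 : (partColon r1).2.1 = []
        · -- exactly one colon
          have hnc : ':' ∉ r1 := (partColon_sep_nil_iff r1).mp s2
          rw [d1, splitC_app n1, splitC_no_colon hnc, findCuts_step n1,
            findCuts_no_colon hnc]
          simp
        · obtain ⟨d2, n2⟩ := partColon_decomp s2
          set a2 := (partColon r1).1 with ha2
          set r2 := (partColon r1).2.2 with hr2
          by_cases s3 : (partColon r2).2.1 = []
          · -- exactly two colons
            have hnc : ':' ∉ r2 := (partColon_sep_nil_iff r2).mp s3
            rw [d1, d2, splitC_app n1, splitC_app n2, splitC_no_colon hnc,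
              findCuts_step n1, findCuts_step n2, findCuts_no_colon hnc]
            simp
          · obtain ⟨d3, n3⟩ := partColon_decomp s3
            set a3 := (partColon r2).1 with ha3
            set a4 := (partColon r2).2.2 with ha4
            by_cases hlast : ':' ∈ a4
            · -- four or more colons
              rw [d1, d2, d3, splitC_app n1, splitC_app n2, splitC_app n3,
                findCuts_step n1, findCuts_step n2, findCuts_step n3,
                findCuts_overflow hlast _ (by simp)]
              have h2le : 2 ≤ (splitC a4).length := by
                have hs : (partColon a4).2.1 ≠ [] := by
                  rw [Ne, partColon_sep_nil_iff]; simpa using hlast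
                rw [splitC_cons hs]
                have hnn := splitC_ne_nil (partColon a4).2.2
                cases hx : splitC (partColon a4).2.2 with
                | nil => exact absurd hx hnn
                | cons x y => simp
              have hne : ((a1 : List Char) :: a2 :: a3 :: splitC a4).length ≠ 4 := by
                simp only [List.length_cons]; omega
              rw [if_neg hne]
              simp
            · -- exactly three colons: the slices are the split parts
              rw [d1, d2, d3, splitC_app n1, splitC_app n2, splitC_app n3,
                splitC_no_colon hlast, findCuts_step n1, findCuts_step n2,
                findCuts_step n3, findCuts_no_colon hlast]
              simp
              have E4 : (a1 ++ ':' :: (a2 ++ ':' :: (a3 ++ ':' :: a4))).drop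
                  (a1.length + 1 + a2.length + 1 + a3.length + 1) = a4 := by
                rw [show a1.length + 1 + a2.length + 1 + a3.length + 1
                    = a1.length + ((a2.length + ((a3.length + (0 + 1)) + 1)) + 1) from by ring,
                  drop_cut, drop_cut, drop_cut, List.drop_zero]
              have E3 : List.take a3.length ((a1 ++ ':' :: (a2 ++ ':' :: (a3 ++ ':' :: a4))).drop
                  (a1.length + 1 + a2.length + 1)) = a3 := by
                rw [show a1.length + 1 + a2.length + 1
                    = a1.length + ((a2.length + (0 + 1)) + 1) from by ring,
                  drop_cut, drop_cut, List.drop_zero, List.take_left]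
              rw [E4, E3]

-- ===== VERDICT (by name: the statement is the Claim_ definition above) =====
theorem normalize_proxy_url_py_spec : Claim_equal_normalize_proxy_url_py := by
  intro raw_proxy _
  unfold Spec_normalize_proxy_url_py
  exact ports_eq raw_proxy
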